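-- pv_equiv track=rewrite | github.com/Diegooooo19483/dev_2025_3_workshop1rea | src/games/games.py | validar_movimiento_torre_ajedrez
-- ===== SOURCE A (Python) =====
-- def validar_movimiento_torre_ajedrez(x1, y1, x2, y2, tablero):
--     if not (0 <= x1 < 8 and 0 <= y1 < 8 and 0 <= x2 < 8 and 0 <= y2 < 8):
--         return False
--     if x1 == x2 and y1 == y2:
--         return False
--     if x1 != x2 and y1 != y2:
--         return False
--     if x1 == x2:
--         paso = 1 if y2 > y1 else -1
--         for y in range(y1 + paso, y2, paso):
--             if tablero[x1][y] != " ":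
--                 return False
--     else:
--         paso = 1 if x2 > x1 else -1
--         for x in range(x1 + paso, x2, paso):
--             if tablero[x][y1] != " ":
--                 return False
--     return True
-- ===== SOURCE B (Python) =====
-- def validar_movimiento_torre_ajedrez(x1, y1, x2, y2, tablero):
--     if not (0 <= x1 < 8 and 0 <= y1 < 8 and 0 <= x2 < 8 and 0 <= y2 < 8):
--         return False
--     if (x1 == x2) == (y1 == y2):
--         return False
--     # occupancy scan: walk the WHOLE board once and reject iff some occupied
--     # square lies strictly between the endpoints on the moving line
--     return not any(
--         (x == x1 and x1 == x2 and min(y1, y2) < y < max(y1, y2)) or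
--         (y == y1 and y1 == y2 and min(x1, x2) < x < max(x1, x2))
--         for x, fila in enumerate(tablero)
--         for y, celda in enumerate(fila)
--         if celda != " "
--     )
-- ===== Notes on version B (the rewrite author's own statement) =====
-- stated objective: alternative
-- what changed: A walks the move path square by square with two mirror-image directed range loops and early returns; B never traverses the path: it enumerates every cell of the whole board once (an occupancy scan) and rejects iff some occupied cell lies strictly between the endpoints on the moving line.
-- outside the precondition, e.g. on validar_movimiento_torre_ajedrez(0, 0, 0, 3, [[' ', 'Q']]): A returns False, B returns False
import Mathlib
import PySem

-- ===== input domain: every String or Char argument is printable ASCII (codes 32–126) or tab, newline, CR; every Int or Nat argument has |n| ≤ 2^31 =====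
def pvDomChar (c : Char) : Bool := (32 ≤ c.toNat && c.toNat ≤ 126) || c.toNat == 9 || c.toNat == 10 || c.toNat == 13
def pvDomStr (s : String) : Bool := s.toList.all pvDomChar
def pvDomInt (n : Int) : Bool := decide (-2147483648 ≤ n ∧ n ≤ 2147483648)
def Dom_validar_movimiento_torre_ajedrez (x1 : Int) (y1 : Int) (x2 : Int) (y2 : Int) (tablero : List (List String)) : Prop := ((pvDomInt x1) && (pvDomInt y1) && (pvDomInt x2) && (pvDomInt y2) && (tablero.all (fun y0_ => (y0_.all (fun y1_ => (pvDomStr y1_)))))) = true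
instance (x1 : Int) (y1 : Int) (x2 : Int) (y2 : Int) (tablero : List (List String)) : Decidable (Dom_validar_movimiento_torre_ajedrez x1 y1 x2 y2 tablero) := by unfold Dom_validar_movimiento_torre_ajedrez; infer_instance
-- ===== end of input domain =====

-- B replaces A's directed walk along the move path by an occupancy scan of the WHOLE
-- board: it enumerates every cell once and rejects iff some occupied cell lies strictly
-- between the endpoints on the moving line (objective: alternative; same answers).

-- ===== PORT A =====
-- cell read tablero[x][y]; out-of-range (IndexError in Python) totalized to " " (outside Pre_)
def pvCellA (tablero : List (List String)) (x y : Int) : String :=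
  PySem.List.pyGetD (PySem.List.pyGetD tablero x []) y " "

def validar_movimiento_torre_ajedrez (x1 : Int) (y1 : Int) (x2 : Int) (y2 : Int) (tablero : List (List String)) : Bool :=
  if ¬(0 ≤ x1 ∧ x1 < 8 ∧ 0 ≤ y1 ∧ y1 < 8 ∧ 0 ≤ x2 ∧ x2 < 8 ∧ 0 ≤ y2 ∧ y2 < 8) then false
  else if x1 = x2 ∧ y1 = y2 then false
  else if x1 ≠ x2 ∧ y1 ≠ y2 then false
  else if x1 = x2 then
    -- early 'return False' on a blocker = .all over the traversed squares
    let paso : Int := if y2 > y1 then 1 else -1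
    (PySem.List.pyRange (y1 + paso) y2 paso).all (fun y => pvCellA tablero x1 y == " ")
  else
    let paso : Int := if x2 > x1 then 1 else -1
    (PySem.List.pyRange (x1 + paso) x2 paso).all (fun x => pvCellA tablero x y1 == " ")

-- ===== PORT B =====
def validar_movimiento_torre_ajedrez_alt (x1 : Int) (y1 : Int) (x2 : Int) (y2 : Int) (tablero : List (List String)) : Bool :=
  if ¬(0 ≤ x1 ∧ x1 < 8 ∧ 0 ≤ y1 ∧ y1 < 8 ∧ 0 ≤ x2 ∧ x2 < 8 ∧ 0 ≤ y2 ∧ y2 < 8) then false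
  else if (x1 == x2) == (y1 == y2) then false
  else
    -- not any( cond for x,fila in enumerate(tablero) for y,celda in enumerate(fila) if celda != " " )
    !((PySem.List.enumerate tablero 0).any (fun p =>
        (PySem.List.enumerate p.2 0).any (fun q =>
          q.2 != " " &&
          ((p.1 == x1 && x1 == x2 && decide (min y1 y2 < q.1) && decide (q.1 < max y1 y2)) ||
           (q.1 == y1 && y1 == y2 && decide (min x1 x2 < p.1) && decide (p.1 < max x1 x2))))))

-- ===== PRECONDITION & SPEC =====
-- Pre_ excludes exactly the straight in-bounds moves whose strictly-between path leaves
-- the given board: there Python A either raises IndexError or (blocker first) returns an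
-- early False that B also returns; see the cite in claim.json.
def Pre_validar_movimiento_torre_ajedrez (x1 : Int) (y1 : Int) (x2 : Int) (y2 : Int) (tablero : List (List String)) : Prop :=
  (0 ≤ x1 ∧ x1 < 8 ∧ 0 ≤ y1 ∧ y1 < 8 ∧ 0 ≤ x2 ∧ x2 < 8 ∧ 0 ≤ y2 ∧ y2 < 8) →
    ((x1 = x2 →
        ∀ y ∈ PySem.List.pyRange (min y1 y2 + 1) (max y1 y2) 1,
          x1.toNat < tablero.length ∧ y.toNat < (tablero.getD x1.toNat []).length) ∧
     (y1 = y2 →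
        ∀ x ∈ PySem.List.pyRange (min x1 x2 + 1) (max x1 x2) 1,
          x.toNat < tablero.length ∧ y1.toNat < (tablero.getD x.toNat []).length))
instance (x1 : Int) (y1 : Int) (x2 : Int) (y2 : Int) (tablero : List (List String)) : Decidable (Pre_validar_movimiento_torre_ajedrez x1 y1 x2 y2 tablero) := by unfold Pre_validar_movimiento_torre_ajedrez; infer_instance

def pvWitness_validar_movimiento_torre_ajedrez : Int × Int × Int × Int × List (List String) :=
  (0, 0, 0, 3, [[" ", " ", " ", "r"], [" ", " ", " ", " "]])

def Spec_validar_movimiento_torre_ajedrez (x1 : Int) (y1 : Int) (x2 : Int) (y2 : Int) (tablero : List (List String)) (out : Bool) : Prop := out = validar_movimiento_torre_ajedrez_alt x1 y1 x2 y2 tablero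
instance (x1 : Int) (y1 : Int) (x2 : Int) (y2 : Int) (tablero : List (List String)) (out : Bool) : Decidable (Spec_validar_movimiento_torre_ajedrez x1 y1 x2 y2 tablero out) := by unfold Spec_validar_movimiento_torre_ajedrez; infer_instance

-- ===== CLAIM =====
def Claim_equal_validar_movimiento_torre_ajedrez : Prop := ∀ (x1 : Int) (y1 : Int) (x2 : Int) (y2 : Int) (tablero : List (List String)), Dom_validar_movimiento_torre_ajedrez x1 y1 x2 y2 tablero → Pre_validar_movimiento_torre_ajedrez x1 y1 x2 y2 tablero → Spec_validar_movimiento_torre_ajedrez x1 y1 x2 y2 tablero (validar_movimiento_torre_ajedrez x1 y1 x2 y2 tablero)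

-- ===== LEMMAS AND PROOFS =====

-- A's scan over range(start±1, stop, ±1) succeeds iff every strictly-between square is blank.
theorem a_all_between (c : Int → Bool) (a b : Int) :
    ((PySem.List.pyRange (a + (if b > a then 1 else -1)) b (if b > a then 1 else -1)).all c = true)
      ↔ ∀ y : Int, min a b < y → y < max a b → c y = true := by
  by_cases hgt : b > a
  · simp only [if_pos hgt, List.all_eq_true, PySem.List.mem_pyRange_one]
    constructor
    · intro H y h1 h2; exact H y ⟨by omega, by omega⟩
    · rintro H y ⟨h1, h2⟩; exact H y (by omega) (by omega)
  · simp only [if_neg hgt, List.all_eq_true, PySem.List.mem_pyRange_neg_one]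
    constructor
    · intro H y h1 h2; exact H y ⟨by omega, by omega⟩
    · rintro H y ⟨h1, h2⟩; exact H y (by omega) (by omega)

-- ===== VERDICT =====

-- Vertical move x1 = x2: A's path scan agrees with B's occupancy scan.
theorem vert_case (tab : List (List String)) (x1 y1 y2 : Int)
    (hx0 : 0 ≤ x1) (hy1 : 0 ≤ y1) (hy2 : 0 ≤ y2)
    (hpre : ∀ y ∈ PySem.List.pyRange (min y1 y2 + 1) (max y1 y2) 1,
      x1.toNat < tab.length ∧ y.toNat < (tab.getD x1.toNat []).length) :
    (∀ y : Int, min y1 y2 < y → y < max y1 y2 → (pvCellA tab x1 y == " ") = true)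
      ↔ ((!((PySem.List.enumerate tab 0).any (fun p =>
          (PySem.List.enumerate p.2 0).any (fun q =>
            q.2 != " " && (p.1 == x1 && decide (min y1 y2 < q.1) && decide (q.1 < max y1 y2)))))) = true) := by
  rw [Bool.not_eq_true', List.any_eq_false]
  constructor
  · intro H p hp
    rw [List.any_eq_true]
    rintro ⟨q, hq, hpred⟩
    rcases (PySem.List.mem_enumerate_iff _ _ _).1 hp with ⟨k, hk, rfl⟩
    rcases (PySem.List.mem_enumerate_iff _ _ _).1 hq with ⟨j, hj, rfl⟩
    simp only [zero_add, Bool.and_eq_true] at hpred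
    obtain ⟨hne, ⟨hkx, hd1⟩, hd2⟩ := hpred
    have hkx' : (k : Int) = x1 := by simpa using hkx
    have hcell := H (j : Int) (by simpa using hd1) (by simpa using hd2)
    have hj' : j < tab[k].length := by simpa using hj
    have hcc : pvCellA tab x1 (j : Int) = tab[k][j] := by
      unfold pvCellA
      rw [← hkx', PySem.List.pyGetD_natCast tab k, List.getD_eq_getElem _ _ hk,
          PySem.List.pyGetD_natCast _ j, List.getD_eq_getElem _ _ hj']
    rw [hcc] at hcell
    have hblank : tab[k][j] = " " := by simpa using hcell
    simp [hblank] at hne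
  · intro H y hlo hhi
    have hmem : y ∈ PySem.List.pyRange (min y1 y2 + 1) (max y1 y2) 1 :=
      (PySem.List.mem_pyRange_one).2 ⟨by omega, hhi⟩
    obtain ⟨hkl, hjl⟩ := hpre y hmem
    have hy0 : 0 ≤ y := by omega
    have hrow : tab.getD x1.toNat [] = tab[x1.toNat] := List.getD_eq_getElem _ _ hkl
    have hp : ((x1.toNat : Int), tab[x1.toNat]) ∈ PySem.List.enumerate tab 0 :=
      (PySem.List.mem_enumerate_iff _ _ _).2 ⟨x1.toNat, hkl, by simp⟩
    have hany := H _ hp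
    rw [List.any_eq_true] at hany
    push_neg at hany
    have hjl' : y.toNat < tab[x1.toNat].length := by rw [← hrow]; exact hjl
    have hq : ((y.toNat : Int), tab[x1.toNat][y.toNat]) ∈ PySem.List.enumerate tab[x1.toNat] 0 :=
      (PySem.List.mem_enumerate_iff _ _ _).2 ⟨y.toNat, hjl', by simp⟩
    have hnp := hany _ hq
    dsimp only at hnp
    have hcond : (((x1.toNat : Int) : Int) == x1 && decide (min y1 y2 < ((y.toNat : Int))) && decide (((y.toNat : Int)) < max y1 y2)) = true := by
      simp [Int.toNat_of_nonneg hx0, Int.toNat_of_nonneg hy0, hlo, hhi]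
    rw [hcond, Bool.and_true] at hnp
    have hblank : tab[x1.toNat][y.toNat] = " " := by simpa using hnp
    have hcc : pvCellA tab x1 y = tab[x1.toNat][y.toNat] := by
      unfold pvCellA
      rw [PySem.List.pyGetD_eq_getElem tab [] hx0 (by omega)]
      exact PySem.List.pyGetD_eq_getElem _ " " hy0 (by omega)
    rw [hcc, hblank]
    rfl

-- Horizontal move y1 = y2: same, scanning the column.
theorem horiz_case (tab : List (List String)) (y1 x1 x2 : Int)
    (hy0 : 0 ≤ y1) (hx1 : 0 ≤ x1) (hx2 : 0 ≤ x2)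
    (hpre : ∀ x ∈ PySem.List.pyRange (min x1 x2 + 1) (max x1 x2) 1,
      x.toNat < tab.length ∧ y1.toNat < (tab.getD x.toNat []).length) :
    (∀ x : Int, min x1 x2 < x → x < max x1 x2 → (pvCellA tab x y1 == " ") = true)
      ↔ ((!((PySem.List.enumerate tab 0).any (fun p =>
          (PySem.List.enumerate p.2 0).any (fun q =>
            q.2 != " " && (q.1 == y1 && decide (min x1 x2 < p.1) && decide (p.1 < max x1 x2)))))) = true) := by
  rw [Bool.not_eq_true', List.any_eq_false]
  constructor
  · intro H p hp
    rw [List.any_eq_true]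
    rintro ⟨q, hq, hpred⟩
    rcases (PySem.List.mem_enumerate_iff _ _ _).1 hp with ⟨k, hk, rfl⟩
    rcases (PySem.List.mem_enumerate_iff _ _ _).1 hq with ⟨j, hj, rfl⟩
    simp only [zero_add, Bool.and_eq_true] at hpred
    obtain ⟨hne, ⟨hjy, hd1⟩, hd2⟩ := hpred
    have hjy' : (j : Int) = y1 := by simpa using hjy
    have hcell := H (k : Int) (by simpa using hd1) (by simpa using hd2)
    have hj' : j < tab[k].length := by simpa using hj
    have hcc : pvCellA tab (k : Int) y1 = tab[k][j] := by
      unfold pvCellA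
      rw [PySem.List.pyGetD_natCast tab k, List.getD_eq_getElem _ _ hk,
          ← hjy', PySem.List.pyGetD_natCast _ j, List.getD_eq_getElem _ _ hj']
    rw [hcc] at hcell
    have hblank : tab[k][j] = " " := by simpa using hcell
    simp [hblank] at hne
  · intro H x hlo hhi
    have hmem : x ∈ PySem.List.pyRange (min x1 x2 + 1) (max x1 x2) 1 :=
      (PySem.List.mem_pyRange_one).2 ⟨by omega, hhi⟩
    obtain ⟨hkl, hjl⟩ := hpre x hmem
    have hx0 : 0 ≤ x := by omega
    have hrow : tab.getD x.toNat [] = tab[x.toNat] := List.getD_eq_getElem _ _ hkl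
    have hp : ((x.toNat : Int), tab[x.toNat]) ∈ PySem.List.enumerate tab 0 :=
      (PySem.List.mem_enumerate_iff _ _ _).2 ⟨x.toNat, hkl, by simp⟩
    have hany := H _ hp
    rw [List.any_eq_true] at hany
    push_neg at hany
    have hjl' : y1.toNat < tab[x.toNat].length := by rw [← hrow]; exact hjl
    have hq : ((y1.toNat : Int), tab[x.toNat][y1.toNat]) ∈ PySem.List.enumerate tab[x.toNat] 0 :=
      (PySem.List.mem_enumerate_iff _ _ _).2 ⟨y1.toNat, hjl', by simp⟩
    have hnp := hany _ hq
    dsimp only at hnp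
    have hcond : (((y1.toNat : Int) : Int) == y1 && decide (min x1 x2 < ((x.toNat : Int))) && decide (((x.toNat : Int)) < max x1 x2)) = true := by
      simp [Int.toNat_of_nonneg hy0, Int.toNat_of_nonneg hx0, hlo, hhi]
    rw [hcond, Bool.and_true] at hnp
    have hblank : tab[x.toNat][y1.toNat] = " " := by simpa using hnp
    have hcc : pvCellA tab x y1 = tab[x.toNat][y1.toNat] := by
      unfold pvCellA
      rw [PySem.List.pyGetD_eq_getElem tab [] hx0 (by omega)]
      exact PySem.List.pyGetD_eq_getElem _ " " hy0 (by omega)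
    rw [hcc, hblank]
    rfl

theorem validar_movimiento_torre_ajedrez_spec : Claim_equal_validar_movimiento_torre_ajedrez := by
  intro x1 y1 x2 y2 tab _ hpre
  unfold Spec_validar_movimiento_torre_ajedrez validar_movimiento_torre_ajedrez validar_movimiento_torre_ajedrez_alt
  by_cases h1 : 0 ≤ x1 ∧ x1 < 8 ∧ 0 ≤ y1 ∧ y1 < 8 ∧ 0 ≤ x2 ∧ x2 < 8 ∧ 0 ≤ y2 ∧ y2 < 8
  · rw [if_neg (not_not_intro h1), if_neg (not_not_intro h1)]
    have hp := hpre h1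
    obtain ⟨hx0, hx8, hy10, hy18, hx20, hx28, hy20, hy28⟩ := h1
    by_cases hx : x1 = x2
    · by_cases hy : y1 = y2
      · rw [if_pos ⟨hx, hy⟩, if_pos (by simp [hx, hy])]
      · rw [if_neg (by tauto : ¬(x1 = x2 ∧ y1 = y2)),
            if_neg (by tauto : ¬(x1 ≠ x2 ∧ y1 ≠ y2)), if_pos hx,
            if_neg (by simp [hx, hy] : ¬(((x1 == x2) == (y1 == y2)) = true))]
        subst hx
        have hyb : (y1 == y2) = false := by simp [hy]
        rw [Bool.eq_iff_iff]
        simp only [beq_self_eq_true, Bool.and_true, hyb, Bool.and_false, Bool.false_and,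
          Bool.or_false]
        rw [a_all_between (fun y => pvCellA tab x1 y == " ") y1 y2]
        exact vert_case tab x1 y1 y2 hx0 hy10 hy20 (hp.1 rfl)
    · by_cases hy : y1 = y2
      · rw [if_neg (by tauto : ¬(x1 = x2 ∧ y1 = y2)),
            if_neg (by tauto : ¬(x1 ≠ x2 ∧ y1 ≠ y2)), if_neg hx,
            if_neg (by simp [hx, hy] : ¬(((x1 == x2) == (y1 == y2)) = true))]
        subst hy
        have hxb : (x1 == x2) = false := by simp [hx]
        rw [Bool.eq_iff_iff]
        simp only [beq_self_eq_true, Bool.and_true, hxb, Bool.and_false, Bool.false_and,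
          Bool.false_or]
        rw [a_all_between (fun x => pvCellA tab x y1 == " ") x1 x2]
        exact horiz_case tab y1 x1 x2 hy10 hx0 hx20 (hp.2 rfl)
      · rw [if_neg (by tauto : ¬(x1 = x2 ∧ y1 = y2)), if_pos ⟨hx, hy⟩,
            if_pos (by simp [hx, hy] : ((x1 == x2) == (y1 == y2)) = true)]
  · rw [if_pos h1, if_pos h1]
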